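-- pv_equiv track=rewrite | github.com/songeunm/PS | python/barkingdog_dp/boj_1904.py | dp
-- ===== SOURCE A (Python) =====
-- def dp(n: int):
--     # memo[i]: i자릿수의 2진수를 만들 수 있는 경우의 수
--     # n <= 1000,000 이기 때문에 memo[i] 계산에 필요한 memo[i-1], memo[i-2]만 저장
--     if n == 1:
--         return 1
--     elif n == 2:
--         return 2
--     memo_1 = 1
--     memo_2 = 2
--
--     for i in range(3, n+1):
--         memo_2, memo_1 = (memo_1 + memo_2) % 15746, memo_2 % 15746
--
--     return memo_2
-- ===== SOURCE B (Python) =====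
-- def dp(n: int):
--     m = 15746
--
--     def fib_pair(k):
--         # returns (F(k), F(k+1)) mod m by fast doubling; (0, 1) for k <= 0
--         if k <= 0:
--             return (0, 1)
--         a, b = fib_pair(k // 2)
--         c = (a * ((2 * b - a) % m)) % m
--         d = (a * a + b * b) % m
--         if k % 2 == 0:
--             return (c, d)
--         else:
--             return (d, (c + d) % m)
--
--     return fib_pair(n + 1)[0]
-- ===== Notes on version B (the rewrite author's own statement) =====
-- stated objective: faster
-- what changed: Replaced the linear two-register DP loop with logarithmic fast-doubling Fibonacci recursion modulo the problem modulus.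
-- intended difference: For non-positive n A returns the stale initial accumulator value two, because its loop body never runs, while B returns the fast-doubling Fibonacci value fib(n+1) modulo the problem modulus (zero for negative n, one for n = 0), the intended extension of the count, the problem's real domain being positive n. — e.g. on dp(0): A returns 2, B returns 1
import Mathlib
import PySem

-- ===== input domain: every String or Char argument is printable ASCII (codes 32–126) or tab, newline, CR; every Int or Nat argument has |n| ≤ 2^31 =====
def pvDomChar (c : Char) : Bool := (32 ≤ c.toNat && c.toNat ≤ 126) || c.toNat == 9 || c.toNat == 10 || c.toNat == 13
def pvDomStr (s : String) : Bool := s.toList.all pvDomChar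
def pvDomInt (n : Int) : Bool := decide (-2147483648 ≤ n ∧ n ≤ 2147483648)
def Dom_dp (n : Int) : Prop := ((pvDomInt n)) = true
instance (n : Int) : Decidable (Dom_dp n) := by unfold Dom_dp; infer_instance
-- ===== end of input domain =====

-- B replaces A's O(n) two-register DP loop by O(log n) fast-doubling Fibonacci mod 15746.

-- ===== PORT A =====
-- state (memo_1, memo_2); Python's parallel assignment memo_2, memo_1 = (memo_1+memo_2)%15746, memo_2%15746
def dp (n : Int) : Int :=
  if n = 1 then 1
  else if n = 2 then 2
  else
    ((PySem.List.pyRange 3 (n + 1)).foldl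
      (fun (st : Int × Int) _ => (PySem.Int.mod st.2 15746, PySem.Int.mod (st.1 + st.2) 15746))
      (1, 2)).2

-- ===== PORT B =====
-- fib_pair k = (F(k) mod 15746, F(k+1) mod 15746) by fast doubling; (0,1) for k ≤ 0.
-- The Nat `fuel` argument is only a structural-recursion totality guard (the Python recursion
-- halves k each call); 64 units cover every k reachable from the domain |n| ≤ 2^31.
def fibPair : Nat → Int → Int × Int
  | 0, _ => (0, 1)
  | fuel + 1, k =>
    if k ≤ 0 then (0, 1)
    else
      let p := fibPair fuel (PySem.Int.floordiv k 2)
      let a := p.1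
      let b := p.2
      let c := PySem.Int.mod (a * PySem.Int.mod (2 * b - a) 15746) 15746
      let d := PySem.Int.mod (a * a + b * b) 15746
      if PySem.Int.mod k 2 = 0 then (c, d)
      else (d, PySem.Int.mod (c + d) 15746)

def dp_alt (n : Int) : Int := (fibPair 64 (n + 1)).1

-- ===== PRECONDITION & SPEC =====
-- For non-positive n A returns the stale initial accumulator value two (its loop body never runs),
-- while B returns the fast-doubling Fibonacci value fib(n+1) modulo the problem modulus (zero for
-- negative n, one at n = 0), the intended extension; the problem's real domain is positive n.
def D_dp (n : Int) : Prop := n ≤ 0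
instance (n : Int) : Decidable (D_dp n) := by unfold D_dp; infer_instance

def Spec_dp (n : Int) (out : Int) : Prop := ¬ D_dp n → out = dp_alt n
instance (n : Int) (out : Int) : Decidable (Spec_dp n out) := by unfold Spec_dp; infer_instance

def pvDiffWitness_dp : Int := 0
def pvDiffWitnessOut_dp : Int × Int := (2, 1)

-- ===== CLAIM (what is proved, stated in full; the proofs are below) =====
def Claim_unchanged_dp : Prop := ∀ (n : Int), Dom_dp n → Spec_dp n (dp n)
def Claim_changed_dp : Prop := Dom_dp (pvDiffWitness_dp) ∧ D_dp (pvDiffWitness_dp) ∧ dp (pvDiffWitness_dp) = pvDiffWitnessOut_dp.1 ∧ dp_alt (pvDiffWitness_dp) = pvDiffWitnessOut_dp.2 ∧ pvDiffWitnessOut_dp.1 ≠ pvDiffWitnessOut_dp.2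
def Claim_exact_dp : Prop := ∀ (n : Int), Dom_dp n → D_dp n → dp n ≠ dp_alt n

-- ===== LEMMAS AND PROOFS =====

-- x % m ≡ x, as a ModEq building block
theorem pvModEq_emod (x : Int) : (x % 15746) ≡ x [ZMOD 15746] :=
  Int.emod_emod_of_dvd x dvd_rfl

-- fast-doubling step, even component: mod arithmetic over already-reduced a, b
theorem pvModC (a b : Int) :
    ((a % 15746) * ((2 * (b % 15746) - a % 15746) % 15746)) % 15746
      = (a * (2 * b - a)) % 15746 :=
  (pvModEq_emod a).mul (((pvModEq_emod _).trans
    (((Int.ModEq.refl 2).mul (pvModEq_emod b)).sub (pvModEq_emod a))))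

-- fast-doubling step, odd component
theorem pvModD (a b : Int) :
    ((a % 15746) * (a % 15746) + (b % 15746) * (b % 15746)) % 15746
      = (a * a + b * b) % 15746 :=
  ((pvModEq_emod a).mul (pvModEq_emod a)).add ((pvModEq_emod b).mul (pvModEq_emod b))

theorem pvModAdd (a b : Int) : (a % 15746 + b % 15746) % 15746 = (a + b) % 15746 :=
  (pvModEq_emod a).add (pvModEq_emod b)

-- fibPair computes Fibonacci pairs mod 15746 whenever the fuel covers k's bit length
-- (for k ≤ 0, toNat = 0 and the claim is (0,1))
theorem fibPair_eq (fuel : Nat) (k : Int) (hfuel : k < 2 ^ fuel) :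
    fibPair fuel k = (((Nat.fib k.toNat : Int)) % 15746, ((Nat.fib (k.toNat + 1) : Int)) % 15746) := by
  induction fuel generalizing k with
  | zero =>
    have hk : k ≤ 0 := by norm_num at hfuel; omega
    have : k.toNat = 0 := by omega
    rw [fibPair, this]
    decide
  | succ fuel ih =>
    rw [fibPair]
    by_cases hk : k ≤ 0
    · have : k.toNat = 0 := by omega
      rw [if_pos hk, this]
      decide
    simp only [if_neg hk]
    have h2 : PySem.Int.floordiv k 2 = k / 2 := PySem.Int.floordiv_eq_ediv_of_pos (by norm_num)
    have hP : (0:Int) < 2 ^ fuel := by positivity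
    have hrec : PySem.Int.floordiv k 2 < 2 ^ fuel := by
      rw [h2]
      rw [pow_succ] at hfuel
      omega
    rw [ih _ hrec]
    have hm2 : PySem.Int.mod k 2 = k % 2 := PySem.Int.mod_eq_emod_of_pos (by norm_num)
    set j : Nat := (PySem.Int.floordiv k 2).toNat with hj
    have hfle : Nat.fib j ≤ 2 * Nat.fib (j + 1) :=
      le_trans Nat.fib_le_fib_succ (by omega)
    have hc : ((Nat.fib (2 * j) : Int)) = (Nat.fib j : Int) * (2 * (Nat.fib (j + 1) : Int) - (Nat.fib j : Int)) := by
      rw [Nat.fib_two_mul]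
      push_cast [Nat.cast_sub hfle]
      ring
    have hd : ((Nat.fib (2 * j + 1) : Int)) = (Nat.fib j : Int) * (Nat.fib j : Int) + (Nat.fib (j + 1) : Int) * (Nat.fib (j + 1) : Int) := by
      rw [Nat.fib_two_mul_add_one]
      push_cast
      ring
    simp only [PySem.Int.mod_eq_emod_of_pos (show (0:Int) < 15746 by norm_num), hm2]
    by_cases hpar : k % 2 = 0
    · -- even: k.toNat = 2*j
      have hkj : k.toNat = 2 * j := by rw [hj, h2]; omega
      simp only [if_pos hpar, hkj]
      refine Prod.ext ?_ ?_ <;> simp only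
      · rw [pvModC, ← hc]
      · rw [pvModD, ← hd]
    · -- odd: k.toNat = 2*j + 1
      have hkj : k.toNat = 2 * j + 1 := by rw [hj, h2]; omega
      simp only [if_neg hpar, hkj]
      refine Prod.ext ?_ ?_ <;> simp only
      · rw [pvModD, ← hd]
      · rw [pvModC, pvModD, pvModAdd, ← hc, ← hd,
          show (2 * j + 1 + 1 : Nat) = 2 * j + 2 by ring, Nat.fib_add_two]
        push_cast
        ring_nf

-- A's loop: the register pair is exactly (fib n % 15746, fib (n+1) % 15746)
theorem dp_loop_eq (n : Int) (hn : 2 ≤ n) :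
    ((PySem.List.pyRange 3 (n + 1)).foldl
      (fun (st : Int × Int) _ => (PySem.Int.mod st.2 15746, PySem.Int.mod (st.1 + st.2) 15746))
      (1, 2))
      = (((Nat.fib n.toNat : Int)) % 15746, ((Nat.fib (n.toNat + 1) : Int)) % 15746) := by
  induction n, hn using Int.le_induction with
  | base =>
    have : PySem.List.pyRange 3 (2 + 1) = [] := by decide
    rw [this]
    decide
  | succ n hn ih =>
    rw [show n + 1 + 1 = (n + 1) + 1 by ring,
        PySem.List.pyRange_one_succ_right (by omega), List.foldl_append, ih]
    simp only [List.foldl_cons, List.foldl_nil,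
      PySem.Int.mod_eq_emod_of_pos (show (0:Int) < 15746 by norm_num)]
    have ht : (n + 1).toNat = n.toNat + 1 := by omega
    refine Prod.ext ?_ ?_ <;> simp only [ht]
    · rw [Int.emod_emod_of_dvd _ dvd_rfl]
    · rw [pvModAdd, Nat.fib_add_two]
      push_cast
      ring_nf

theorem dp_eq_fib (n : Int) (hn : 1 ≤ n) :
    dp n = ((Nat.fib (n.toNat + 1) : Int)) % 15746 := by
  unfold dp
  by_cases h1 : n = 1
  · subst h1; decide
  by_cases h2 : n = 2
  · subst h2; decide
  rw [if_neg h1, if_neg h2, dp_loop_eq n (by omega)]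

theorem dp_alt_eq_fib (n : Int) (hn : 0 ≤ n) (hub : n ≤ 2147483648) :
    dp_alt n = ((Nat.fib (n.toNat + 1) : Int)) % 15746 := by
  unfold dp_alt
  rw [fibPair_eq 64 (n + 1) (by norm_num; omega), show (n + 1).toNat = n.toNat + 1 by omega]

-- ===== VERDICT (by name: the statement is the Claim_ definition above) =====
theorem dp_spec : Claim_unchanged_dp := by
  intro n hdom hD
  have hn : 1 ≤ n := by unfold D_dp at hD; omega
  have hub : n ≤ 2147483648 := by
    unfold Dom_dp pvDomInt at hdom; simp at hdom; omega
  show dp n = dp_alt n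
  rw [dp_eq_fib n hn, dp_alt_eq_fib n (by omega) hub]

theorem dp_changed : Claim_changed_dp := by unfold Claim_changed_dp; decide

theorem dp_tight : Claim_exact_dp := by
  intro n _ hD
  unfold D_dp at hD
  have hA : dp n = 2 := by
    unfold dp
    rw [if_neg (by omega), if_neg (by omega)]
    rw [PySem.List.pyRange_one, show (n + 1 - 3).toNat = 0 by omega]
    decide
  have hB : dp_alt n = (Nat.fib ((n + 1).toNat) : Int) % 15746 := by
    unfold dp_alt; rw [fibPair_eq 64 (n + 1) (by norm_num; omega)]
  have ht : (n + 1).toNat = 0 ∨ (n + 1).toNat = 1 := by omega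
  rw [hA, hB]
  rcases ht with h | h <;> rw [h] <;> decide
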